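-- pv_equiv track=rewrite | github.com/yooneverse/ssafystudy | donghwi/week6/BAEK_17406_배열 돌리기 4.py | rounding
-- ===== SOURCE A (Python) =====
-- def rounding(edge, mat):
--     r, c, s = edge
--
--     new_mat = [row[:] for row in mat]
--
--     for layer in range(1, s + 1):
--         top, left = r - layer, c - layer
--         bottom, right = r + layer, c + layer
--
--         # 상단 행: (top, left..right-1) -> (top, left+1..right)
--         for j in range(left + 1, right + 1):
--             new_mat[top][j] = mat[top][j - 1]
--
--         # 우측 열: (top..bottom-1, right) -> (top+1..bottom, right)
--         for i in range(top + 1, bottom + 1):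
--             new_mat[i][right] = mat[i - 1][right]
--
--         # 하단 행: (bottom, right..left+1) -> (bottom, right-1..left)
--         for j in range(right - 1, left - 1, -1):
--             new_mat[bottom][j] = mat[bottom][j + 1]
--
--         # 좌측 열: (bottom..top+1, left) -> (bottom-1..top, left)
--         for i in range(bottom - 1, top - 1, -1):
--             new_mat[i][left] = mat[i + 1][left]
--
--     return new_mat
-- ===== SOURCE B (Python) =====
-- def rounding(edge, mat):
--     r, c, s = edge
--
--     new_mat = [row[:] for row in mat]
--
--     for layer in range(1, s + 1):
--         top, left = r - layer, c - layer
--         bottom, right = r + layer, c + layer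
--
--         # ring coordinates, clockwise, starting just right of the top-left corner
--         coords = ([(top, j) for j in range(left + 1, right + 1)]
--                   + [(i, right) for i in range(top + 1, bottom + 1)]
--                   + [(bottom, j) for j in range(right - 1, left - 1, -1)]
--                   + [(i, left) for i in range(bottom - 1, top - 1, -1)])
--
--         vals = [mat[i][j] for (i, j) in coords]
--         vals = [vals[-1]] + vals[:-1]          # one clockwise step
--
--         for (i, j), v in zip(coords, vals):
--             new_mat[i][j] = v
--
--     return new_mat
-- ===== Notes on version B (the rewrite author's own statement) =====
-- stated objective: simpler
-- what changed: Replaces the four in-place shifted-neighbour write loops per layer with a gather/rotate/scatter decomposition: build the ring's coordinate list clockwise, read the values, rotate the value list by one, and write it back.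
import Mathlib
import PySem

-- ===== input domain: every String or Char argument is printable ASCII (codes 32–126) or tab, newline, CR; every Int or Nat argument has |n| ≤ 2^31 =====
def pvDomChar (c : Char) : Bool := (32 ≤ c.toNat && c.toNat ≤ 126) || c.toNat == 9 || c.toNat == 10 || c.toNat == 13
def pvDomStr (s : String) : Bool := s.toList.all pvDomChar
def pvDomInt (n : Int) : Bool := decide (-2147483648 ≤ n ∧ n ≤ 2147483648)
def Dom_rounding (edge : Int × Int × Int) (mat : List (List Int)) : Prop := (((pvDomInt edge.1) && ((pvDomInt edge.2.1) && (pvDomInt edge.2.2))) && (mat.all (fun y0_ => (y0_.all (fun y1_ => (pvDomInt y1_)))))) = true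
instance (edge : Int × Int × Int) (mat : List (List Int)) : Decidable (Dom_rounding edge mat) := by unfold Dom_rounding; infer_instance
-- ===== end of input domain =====

-- B replaces A's four shifted-neighbour write loops per layer by gather / rotate-by-one / scatter
-- over the ring's clockwise coordinate list (objective: simpler decomposition, same cost).

-- ===== PORT A =====
-- mat[i][j] read: Python indexing with negative wrap-around (exact under Pre_, where the index is valid)
def pyCell (mat : List (List Int)) (i j : Int) : Int :=
  (PySem.List.pyGet? ((PySem.List.pyGet? mat i).getD []) j).getD 0

-- new_mat[i][j] = v: Python assignment with negative wrap-around (exact under Pre_, where the index is valid)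
def pySetCell (mat : List (List Int)) (i j : Int) (v : Int) : List (List Int) :=
  let ii : Int := if i < 0 then i + mat.length else i
  if 0 ≤ ii then
    mat.modify ii.toNat (fun row =>
      let jj : Int := if j < 0 then j + row.length else j
      if 0 ≤ jj then row.set jj.toNat v else row)
  else mat

def rounding (edge : Int × Int × Int) (mat : List (List Int)) : List (List Int) :=
  let r := edge.1
  let c := edge.2.1
  let s := edge.2.2
  let new0 := mat.map (fun row => PySem.List.slice row none none)   -- row[:]
  (PySem.List.pyRange 1 (s + 1) 1).foldl (fun nm layer =>
    let top := r - layer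
    let left := c - layer
    let bottom := r + layer
    let right := c + layer
    let nm1 := (PySem.List.pyRange (left + 1) (right + 1) 1).foldl
      (fun acc j => pySetCell acc top j (pyCell mat top (j - 1))) nm
    let nm2 := (PySem.List.pyRange (top + 1) (bottom + 1) 1).foldl
      (fun acc i => pySetCell acc i right (pyCell mat (i - 1) right)) nm1
    let nm3 := (PySem.List.pyRange (right - 1) (left - 1) (-1)).foldl
      (fun acc j => pySetCell acc bottom j (pyCell mat bottom (j + 1))) nm2
    (PySem.List.pyRange (bottom - 1) (top - 1) (-1)).foldl
      (fun acc i => pySetCell acc i left (pyCell mat (i + 1) left)) nm3) new0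

-- ===== PORT B =====
-- the ring's coordinates, clockwise, starting just right of the top-left corner
def ringCoords (r c layer : Int) : List (Int × Int) :=
  let top := r - layer
  let left := c - layer
  let bottom := r + layer
  let right := c + layer
  ((PySem.List.pyRange (left + 1) (right + 1) 1).map (fun j => (top, j)))
  ++ ((PySem.List.pyRange (top + 1) (bottom + 1) 1).map (fun i => (i, right)))
  ++ ((PySem.List.pyRange (right - 1) (left - 1) (-1)).map (fun j => (bottom, j)))
  ++ ((PySem.List.pyRange (bottom - 1) (top - 1) (-1)).map (fun i => (i, left)))

def rounding_alt (edge : Int × Int × Int) (mat : List (List Int)) : List (List Int) :=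
  let r := edge.1
  let c := edge.2.1
  let s := edge.2.2
  let new0 := mat.map (fun row => PySem.List.slice row none none)   -- row[:]
  (PySem.List.pyRange 1 (s + 1) 1).foldl (fun nm layer =>
    let coords := ringCoords r c layer
    let vals := coords.map (fun p => pyCell mat p.1 p.2)
    -- [vals[-1]] + vals[:-1]  (vals is nonempty for every layer ≥ 1, so the .getD 0 default is dead)
    let vals2 := (PySem.List.pyGet? vals (-1)).getD 0 :: PySem.List.slice vals none (some (-1))
    (coords.zip vals2).foldl (fun acc pv => pySetCell acc pv.1.1 pv.1.2 pv.2) nm) new0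

-- ===== PRECONDITION & SPEC =====
-- Exactly the inputs on which the Python A returns (no IndexError): every accessed row index is in
-- Python range of mat, and in every accessed (possibly wrapped) row every accessed column index is
-- in Python range of that row.
def Pre_rounding (edge : Int × Int × Int) (mat : List (List Int)) : Prop :=
  edge.2.2 ≤ 0 ∨
    (-(mat.length : Int) ≤ edge.1 - edge.2.2 ∧ edge.1 + edge.2.2 < (mat.length : Int) ∧
      ∀ layer ∈ PySem.List.pyRange 1 (edge.2.2 + 1) 1,
        ∀ i ∈ PySem.List.pyRange (edge.1 - layer) (edge.1 + layer + 1) 1,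
          -(((PySem.List.pyGet? mat i).getD []).length : Int) ≤ edge.2.1 - layer ∧
          edge.2.1 + layer < (((PySem.List.pyGet? mat i).getD []).length : Int))
instance (edge : Int × Int × Int) (mat : List (List Int)) : Decidable (Pre_rounding edge mat) := by
  unfold Pre_rounding; infer_instance

def pvWitness_rounding : (Int × Int × Int) × List (List Int) :=
  ((1, 1, 1), [[1, 2, 3], [4, 5, 6], [7, 8, 9]])

def Spec_rounding (edge : Int × Int × Int) (mat : List (List Int)) (out : List (List Int)) : Prop := out = rounding_alt edge mat
instance (edge : Int × Int × Int) (mat : List (List Int)) (out : List (List Int)) : Decidable (Spec_rounding edge mat out) := by unfold Spec_rounding; infer_instance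

-- ===== CLAIM (what is proved, stated in full; the proofs are below) =====
def Claim_equal_rounding : Prop := ∀ (edge : Int × Int × Int) (mat : List (List Int)), Dom_rounding edge mat → Pre_rounding edge mat → Spec_rounding edge mat (rounding edge mat)

-- ===== LEMMAS AND PROOFS =====

-- one write step, as a function of a (coordinate, value) pair
def wr (acc : List (List Int)) (pv : (Int × Int) × Int) : List (List Int) :=
  pySetCell acc pv.1.1 pv.1.2 pv.2

-- pair each coordinate with the ring value of its predecessor (v = value for the first one)
def ringPairs (g : Int × Int → Int) : List (Int × Int) → Int → List ((Int × Int) × Int)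
  | [], _ => []
  | p :: rest, v => (p, v) :: ringPairs g rest (g p)

def lastVal (g : Int × Int → Int) (xs : List (Int × Int)) (v : Int) : Int :=
  match xs.getLast? with
  | some p => g p
  | none => v

theorem zip_shift (g : Int × Int → Int) :
    ∀ (cs : List (Int × Int)) (v : Int),
      cs.zip (v :: (cs.map g).dropLast) = ringPairs g cs v := by
  intro cs
  induction cs with
  | nil => intro v; rfl
  | cons p rest ih =>
    intro v
    cases rest with
    | nil => rfl
    | cons q rest' =>
      have hdl : (List.map g (p :: q :: rest')).dropLast
          = g p :: (List.map g (q :: rest')).dropLast := by simp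
      rw [hdl, List.zip_cons_cons]
      simp only [ringPairs]
      rw [ih (g p)]
      rfl

theorem ringPairs_append (g : Int × Int → Int) :
    ∀ (xs ys : List (Int × Int)) (v : Int),
      ringPairs g (xs ++ ys) v = ringPairs g xs v ++ ringPairs g ys (lastVal g xs v) := by
  intro xs
  induction xs with
  | nil => intro ys v; rfl
  | cons p rest ih =>
    intro ys v
    simp only [List.cons_append, ringPairs]
    rw [ih]
    congr 1
    cases rest with
    | nil => simp [lastVal]
    | cons q rest' =>
      cases hq : (q :: rest').getLast? with
      | none => simp at hq
      | some z => simp [lastVal, hq]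

theorem ringPairs_range (g : Int × Int → Int) :
    ∀ (n : Nat) (F : Nat → Int × Int) (G : Nat → Int) (v : Int),
      v = G 0 → (∀ k, g (F k) = G (k + 1)) →
      ringPairs g ((List.range n).map F) v = (List.range n).map (fun k => (F k, G k)) := by
  intro n
  induction n with
  | zero => intro F G v _ _; rfl
  | succ m ih =>
    intro F G v hv hstep
    rw [List.range_succ_eq_map]
    simp only [List.map_cons, List.map_map, ringPairs]
    have h2 := ih (fun k => F (k + 1)) (fun k => G (k + 1)) (g (F 0)) (hstep 0)
      (fun k => hstep (k + 1))
    simp only [Function.comp_def, Nat.succ_eq_add_one]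
    rw [h2]
    simp [hv]

theorem getLast?_range_map {α : Type} (F : Nat → α) (n : Nat) (h : 0 < n) :
    ((List.range n).map F).getLast? = some (F (n - 1)) := by
  obtain ⟨m, rfl⟩ : ∃ m, n = m + 1 := ⟨n - 1, by omega⟩
  rw [List.range_succ, List.map_append]
  simp


theorem lastVal_range (g : Int × Int → Int) (F : Nat → Int × Int) (n : Nat) (v : Int)
    (hn : 0 < n) : lastVal g ((List.range n).map F) v = g (F (n - 1)) := by
  unfold lastVal
  rw [getLast?_range_map F n hn]

theorem main_generic (g : Int × Int → Int) (F1 F2 F3 F4 : Nat → Int × Int)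
    (G1 G2 G3 G4 : Nat → Int) (n : Nat) (hn : 0 < n)
    (h1v : g (F4 (n - 1)) = G1 0) (h1 : ∀ k, g (F1 k) = G1 (k + 1))
    (h2v : g (F1 (n - 1)) = G2 0) (h2 : ∀ k, g (F2 k) = G2 (k + 1))
    (h3v : g (F2 (n - 1)) = G3 0) (h3 : ∀ k, g (F3 k) = G3 (k + 1))
    (h4v : g (F3 (n - 1)) = G4 0) (h4 : ∀ k, g (F4 k) = G4 (k + 1))
    (nm : List (List Int)) :
    List.foldl wr nm
        ((List.range n).map (fun k => (F1 k, G1 k)) ++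
          ((List.range n).map (fun k => (F2 k, G2 k)) ++
            ((List.range n).map (fun k => (F3 k, G3 k)) ++
              (List.range n).map (fun k => (F4 k, G4 k)))))
      =
      List.foldl wr nm
        (((List.range n).map F1 ++ ((List.range n).map F2 ++ ((List.range n).map F3 ++ (List.range n).map F4))).zip
          ((PySem.List.pyGet?
              (((List.range n).map F1 ++ ((List.range n).map F2 ++ ((List.range n).map F3 ++ (List.range n).map F4))).map g)
              (-1)).getD 0 ::
            PySem.List.slice
              (((List.range n).map F1 ++ ((List.range n).map F2 ++ ((List.range n).map F3 ++ (List.range n).map F4))).map g)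
              none (some (-1)))) := by
  set coords := (List.range n).map F1 ++ ((List.range n).map F2 ++ ((List.range n).map F3 ++ (List.range n).map F4)) with hc
  have hlast : (coords.map g).getLast? = some (g (F4 (n - 1))) := by
    rw [hc]
    simp only [List.map_append, List.getLast?_append, List.map_map]
    rw [getLast?_range_map (g ∘ F1) n hn, getLast?_range_map (g ∘ F2) n hn,
      getLast?_range_map (g ∘ F3) n hn, getLast?_range_map (g ∘ F4) n hn]
    simp
  rw [PySem.List.pyGet?_neg_one, hlast, PySem.List.slice_to_neg_one, Option.getD_some]
  rw [zip_shift g coords (g (F4 (n - 1)))]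
  rw [hc]
  rw [ringPairs_append g, ringPairs_append g, ringPairs_append g]
  rw [lastVal_range g F1 n _ hn, lastVal_range g F2 n _ hn, lastVal_range g F3 n _ hn]
  rw [ringPairs_range g n F1 G1 _ h1v h1, ringPairs_range g n F2 G2 _ h2v h2,
    ringPairs_range g n F3 G3 _ h3v h3, ringPairs_range g n F4 G4 _ h4v h4]

-- the per-layer bodies agree for every layer ≥ 1
theorem body_eq (mat : List (List Int)) (r c layer : Int) (hl : 1 ≤ layer)
    (nm : List (List Int)) :
    (let top := r - layer
     let left := c - layer
     let bottom := r + layer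
     let right := c + layer
     let nm1 := (PySem.List.pyRange (left + 1) (right + 1) 1).foldl
       (fun acc j => pySetCell acc top j (pyCell mat top (j - 1))) nm
     let nm2 := (PySem.List.pyRange (top + 1) (bottom + 1) 1).foldl
       (fun acc i => pySetCell acc i right (pyCell mat (i - 1) right)) nm1
     let nm3 := (PySem.List.pyRange (right - 1) (left - 1) (-1)).foldl
       (fun acc j => pySetCell acc bottom j (pyCell mat bottom (j + 1))) nm2
     (PySem.List.pyRange (bottom - 1) (top - 1) (-1)).foldl
       (fun acc i => pySetCell acc i left (pyCell mat (i + 1) left)) nm3)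
    =
    (let coords := ringCoords r c layer
     let vals := coords.map (fun p => pyCell mat p.1 p.2)
     let vals2 := (PySem.List.pyGet? vals (-1)).getD 0 :: PySem.List.slice vals none (some (-1))
     (coords.zip vals2).foldl (fun acc pv => pySetCell acc pv.1.1 pv.1.2 pv.2) nm) := by
  simp only [ringCoords]
  set n2 : Nat := (2 * layer).toNat with hn2
  have hn2c : (n2 : Int) = 2 * layer := by omega
  have hn2pos : 0 < n2 := by omega
  have hT : PySem.List.pyRange (c - layer + 1) (c + layer + 1) 1
      = (List.range n2).map (fun k : Nat => c - layer + 1 + (k : Int)) := by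
    have e : (c + layer + 1 - (c - layer + 1)).toNat = n2 := by omega
    rw [PySem.List.pyRange_one, e]
  have hR : PySem.List.pyRange (r - layer + 1) (r + layer + 1) 1
      = (List.range n2).map (fun k : Nat => r - layer + 1 + (k : Int)) := by
    have e : (r + layer + 1 - (r - layer + 1)).toNat = n2 := by omega
    rw [PySem.List.pyRange_one, e]
  have hBt : PySem.List.pyRange (c + layer - 1) (c - layer - 1) (-1)
      = (List.range n2).map (fun k : Nat => c + layer - 1 - (k : Int)) := by
    have e : (c + layer - 1 - (c - layer - 1)).toNat = n2 := by omega
    rw [PySem.List.pyRange_neg_one, e]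
  have hLt : PySem.List.pyRange (r + layer - 1) (r - layer - 1) (-1)
      = (List.range n2).map (fun k : Nat => r + layer - 1 - (k : Int)) := by
    have e : (r + layer - 1 - (r - layer - 1)).toNat = n2 := by omega
    rw [PySem.List.pyRange_neg_one, e]
  rw [hT, hR, hBt, hLt]
  have key := main_generic (fun p : Int × Int => pyCell mat p.1 p.2)
      (fun k : Nat => ((r - layer : Int), c - layer + 1 + (k : Int)))
      (fun k : Nat => (r - layer + 1 + (k : Int), (c + layer : Int)))
      (fun k : Nat => ((r + layer : Int), c + layer - 1 - (k : Int)))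
      (fun k : Nat => (r + layer - 1 - (k : Int), (c - layer : Int)))
      (fun k : Nat => pyCell mat (r - layer) (c - layer + 1 + (k : Int) - 1))
      (fun k : Nat => pyCell mat (r - layer + 1 + (k : Int) - 1) (c + layer))
      (fun k : Nat => pyCell mat (r + layer) (c + layer - 1 - (k : Int) + 1))
      (fun k : Nat => pyCell mat (r + layer - 1 - (k : Int) + 1) (c - layer))
      n2 hn2pos
      (by beta_reduce; congr 2 <;> omega)
      (by intro k; beta_reduce; congr 2 <;> omega)
      (by beta_reduce; congr 2 <;> omega)
      (by intro k; beta_reduce; congr 2 <;> omega)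
      (by beta_reduce; congr 2 <;> omega)
      (by intro k; beta_reduce; congr 2 <;> omega)
      (by beta_reduce; congr 2 <;> omega)
      (by intro k; beta_reduce; congr 2 <;> omega)
      nm
  simp only [List.map_map, Function.comp_def, List.append_assoc, List.foldl_append,
    List.foldl_map] at key ⊢
  exact key

-- ===== VERDICT (by name: the statement is the Claim_ definition above) =====
theorem rounding_spec : Claim_equal_rounding := by
  intro edge mat _ _
  show rounding edge mat = rounding_alt edge mat
  unfold rounding rounding_alt
  refine PySem.List.foldl_congr_mem _ _ _ _ ?_
  intro acc layer hmem
  have hl : 1 ≤ layer := (PySem.List.mem_pyRange_one.mp hmem).1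
  exact body_eq mat edge.1 edge.2.1 layer hl acc
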